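-- pv_equiv track=rewrite | github.com/WrightonLabCSU/DRAM | mag_annotator/annotate_vgfs.py | calculate_auxiliary_scores
-- ===== SOURCE A (Python) =====
-- VIRSORTER_HALLMARK_GENE_CATEGORIES = {'0', '3'}
--
-- VIRSORTER_VIRAL_LIKE_GENE_CATEGORIES = {'1', '4'}
--
-- def calculate_auxiliary_scores(gene_order):
--     # right now saying that flanked means between here and the end of the contig
--     gene_auxiliary_score_dict = dict()
--     for i, (dram_gene, virsorter_gene, virsorter_category) in enumerate(gene_order):
--         if dram_gene is not None:
--             left_categories = [left_virsorter_category for left_dram_gene, left_viral_gene, left_virsorter_category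
--                                in gene_order[:i] if left_viral_gene is not None]
--             hallmark_left = len(set(left_categories) & set(VIRSORTER_HALLMARK_GENE_CATEGORIES)) > 0
--             viral_like_left = len(set(left_categories) & set(VIRSORTER_VIRAL_LIKE_GENE_CATEGORIES)) > 0
--
--             right_categories = [right_virsorter_category for right_dram_gene, right_viral_gene, right_virsorter_category
--                                 in gene_order[i+1:] if right_viral_gene is not None]
--             hallmark_right = len(set(right_categories) & set(VIRSORTER_HALLMARK_GENE_CATEGORIES)) > 0
--             viral_like_right = len(set(right_categories) & set(VIRSORTER_VIRAL_LIKE_GENE_CATEGORIES)) > 0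
--             # if end of contig then 5:
--             if i == 0 or i == (len(gene_order)-1):
--                 auxiliary_score = 5
--             elif hallmark_left and hallmark_right:  # hallmark on both sides then cat 1
--                 auxiliary_score = 1
--             # hallmark on one side and viral like on other then cat 2
--             elif (hallmark_left and viral_like_right) or (viral_like_left and hallmark_right):
--                 auxiliary_score = 2
--             # viral like on both side then cat 3
--             elif viral_like_left and viral_like_right:
--                 auxiliary_score = 3
--             # not end of contig and hallmark or viral like on other side
--             elif (hallmark_left or viral_like_left) or (hallmark_right or viral_like_right):
--                 auxiliary_score = 4
--             # if gene is the only virsorter viral like or hallmark on contig then make it a 4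
--             elif (virsorter_category in VIRSORTER_HALLMARK_GENE_CATEGORIES) or \
--                  (virsorter_category in VIRSORTER_VIRAL_LIKE_GENE_CATEGORIES):
--                 auxiliary_score = 4
--             else:  # if no viral like or hallmark genes then score is 5
--                 auxiliary_score = 5
--             gene_auxiliary_score_dict[dram_gene] = auxiliary_score
--     return gene_auxiliary_score_dict
-- ===== SOURCE B (Python) =====
-- VIRSORTER_HALLMARK_GENE_CATEGORIES = {'0', '3'}
--
-- VIRSORTER_VIRAL_LIKE_GENE_CATEGORIES = {'1', '4'}
--
-- def calculate_auxiliary_scores(gene_order):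
--     # O(n): suffix hallmark/viral-like flags in one backward pass, then one
--     # forward pass carrying the prefix flags.
--     n = len(gene_order)
--     suf = [(False, False)] * n
--     hr = vr = False
--     for i in range(n - 1, -1, -1):
--         suf[i] = (hr, vr)
--         _, vg, vc = gene_order[i]
--         if vg is not None:
--             if vc in VIRSORTER_HALLMARK_GENE_CATEGORIES:
--                 hr = True
--             if vc in VIRSORTER_VIRAL_LIKE_GENE_CATEGORIES:
--                 vr = True
--     result = {}
--     hl = vl = False
--     for i, (dg, vg, vc) in enumerate(gene_order):
--         hr, vr = suf[i]
--         if dg is not None: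
--             if i == 0 or i == n - 1:
--                 score = 5
--             elif hl and hr:
--                 score = 1
--             elif (hl and vr) or (vl and hr):
--                 score = 2
--             elif vl and vr:
--                 score = 3
--             elif hl or vl or hr or vr:
--                 score = 4
--             elif vc in VIRSORTER_HALLMARK_GENE_CATEGORIES or vc in VIRSORTER_VIRAL_LIKE_GENE_CATEGORIES:
--                 score = 4
--             else:
--                 score = 5
--             result[dg] = score
--         if vg is not None:
--             if vc in VIRSORTER_HALLMARK_GENE_CATEGORIES:
--                 hl = True
--             if vc in VIRSORTER_VIRAL_LIKE_GENE_CATEGORIES: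
--                 vl = True
--     return result
-- ===== Notes on version B (the rewrite author's own statement) =====
-- stated objective: faster
-- what changed: Instead of rebuilding left/right category sets by slicing the whole list at every gene, B precomputes suffix hallmark/viral-like flags in one backward pass and carries prefix flags through one forward pass.
import Mathlib
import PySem

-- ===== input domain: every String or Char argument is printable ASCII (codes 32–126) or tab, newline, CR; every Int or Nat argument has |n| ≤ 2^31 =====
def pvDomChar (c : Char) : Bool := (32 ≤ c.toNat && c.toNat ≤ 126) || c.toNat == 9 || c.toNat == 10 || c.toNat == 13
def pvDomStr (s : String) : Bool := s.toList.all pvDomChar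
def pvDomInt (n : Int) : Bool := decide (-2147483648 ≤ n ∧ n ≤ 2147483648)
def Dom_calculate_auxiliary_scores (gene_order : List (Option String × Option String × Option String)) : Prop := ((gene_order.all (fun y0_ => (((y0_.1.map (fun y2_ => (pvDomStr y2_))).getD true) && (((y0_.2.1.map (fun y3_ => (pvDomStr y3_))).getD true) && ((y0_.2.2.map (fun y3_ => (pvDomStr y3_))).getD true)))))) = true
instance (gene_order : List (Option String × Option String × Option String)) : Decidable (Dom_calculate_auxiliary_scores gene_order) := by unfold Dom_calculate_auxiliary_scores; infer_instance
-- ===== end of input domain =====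

-- B replaces A's per-gene slicing and set intersections by one backward pass computing
-- suffix hallmark/viral-like flags plus one forward pass carrying prefix flags (O(n) vs O(n^2)).

-- ===== PORT A =====
-- VIRSORTER_HALLMARK_GENE_CATEGORIES / VIRSORTER_VIRAL_LIKE_GENE_CATEGORIES, as sets of the
-- (optional) category values the tuples carry
def pvHallmarkSet : PySem.Set (Option String) := PySem.Set.ofList [some "0", some "3"]
def pvViralLikeSet : PySem.Set (Option String) := PySem.Set.ofList [some "1", some "4"]

def calculate_auxiliary_scores (gene_order : List (Option String × Option String × Option String)) : List (String × Int) :=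
  (((PySem.List.enumerate gene_order 0).foldl (fun d p =>
    let i := p.1
    let dram_gene := p.2.1
    let virsorter_category := p.2.2.2
    match dram_gene with
    | none => d
    | some g =>
      let left_categories := (PySem.List.slice gene_order none (some i)).filterMap
        (fun q => if q.2.1.isSome then some q.2.2 else none)
      let hallmark_left := decide (0 < PySem.Set.len (PySem.Set.inter (PySem.Set.ofList left_categories) pvHallmarkSet))
      let viral_like_left := decide (0 < PySem.Set.len (PySem.Set.inter (PySem.Set.ofList left_categories) pvViralLikeSet))
      let right_categories := (PySem.List.slice gene_order (some (i + 1)) none).filterMap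
        (fun q => if q.2.1.isSome then some q.2.2 else none)
      let hallmark_right := decide (0 < PySem.Set.len (PySem.Set.inter (PySem.Set.ofList right_categories) pvHallmarkSet))
      let viral_like_right := decide (0 < PySem.Set.len (PySem.Set.inter (PySem.Set.ofList right_categories) pvViralLikeSet))
      let auxiliary_score : Int :=
        if i == 0 || i == ((gene_order.length : Int) - 1) then 5
        else if hallmark_left && hallmark_right then 1
        else if (hallmark_left && viral_like_right) || (viral_like_left && hallmark_right) then 2
        else if viral_like_left && viral_like_right then 3
        else if (hallmark_left || viral_like_left) || (hallmark_right || viral_like_right) then 4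
        else if PySem.Set.contains pvHallmarkSet virsorter_category
             || PySem.Set.contains pvViralLikeSet virsorter_category then 4
        else 5
      d.insert g auxiliary_score) (PySem.Dict.empty : PySem.Dict String Int))).items

-- ===== PORT B =====
def pvIsH (c : Option String) : Bool := c == some "0" || c == some "3"
def pvIsV (c : Option String) : Bool := c == some "1" || c == some "4"

-- backward pass: returns (suffix-flag list suf, hr, vr) where suf[i] are the flags for
-- the part strictly after position i and (hr, vr) are the flags for the whole list
def pvSufFlags : List (Option String × Option String × Option String) → List (Bool × Bool) × Bool × Bool
  | [] => ([], false, false)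
  | (_, vg, vc) :: rest =>
    let r := pvSufFlags rest
    ((r.2.1, r.2.2) :: r.1,
     r.2.1 || (vg.isSome && pvIsH vc),
     r.2.2 || (vg.isSome && pvIsV vc))

def pvScore (hl vl hr vr : Bool) (atEnd : Bool) (vc : Option String) : Int :=
  if atEnd then 5
  else if hl && hr then 1
  else if (hl && vr) || (vl && hr) then 2
  else if vl && vr then 3
  else if hl || vl || hr || vr then 4
  else if pvIsH vc || pvIsV vc then 4
  else 5

-- forward pass over the genes zipped with their suffix flags, carrying the prefix flags
def pvFwd (d : PySem.Dict String Int) (hl vl : Bool) (i n : Nat) :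
    List (Option String × Option String × Option String) → List (Bool × Bool) → PySem.Dict String Int
  | [], _ => d
  | _ :: _, [] => d
  | (dg, vg, vc) :: rest, (hr, vr) :: sfs =>
    let d' := match dg with
      | some g => d.insert g (pvScore hl vl hr vr (i == 0 || i == n - 1) vc)
      | none => d
    pvFwd d' (hl || (vg.isSome && pvIsH vc)) (vl || (vg.isSome && pvIsV vc)) (i + 1) n rest sfs

def calculate_auxiliary_scores_alt (gene_order : List (Option String × Option String × Option String)) : List (String × Int) :=
  (pvFwd PySem.Dict.empty false false 0 gene_order.length gene_order (pvSufFlags gene_order).1).items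

-- ===== PRECONDITION & SPEC =====
def Spec_calculate_auxiliary_scores (gene_order : List (Option String × Option String × Option String)) (out : List (String × Int)) : Prop := out = calculate_auxiliary_scores_alt gene_order
instance (gene_order : List (Option String × Option String × Option String)) (out : List (String × Int)) : Decidable (Spec_calculate_auxiliary_scores gene_order out) := by unfold Spec_calculate_auxiliary_scores; infer_instance

-- ===== CLAIM (what is proved, stated in full; the proofs are below) =====
def Claim_equal_calculate_auxiliary_scores : Prop := ∀ (gene_order : List (Option String × Option String × Option String)), Dom_calculate_auxiliary_scores gene_order → Spec_calculate_auxiliary_scores gene_order (calculate_auxiliary_scores gene_order)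

-- ===== LEMMAS AND PROOFS =====

-- boolean "some gene with a VirSorter annotation in l has a hallmark / viral-like category"
def pvHasH (l : List (Option String × Option String × Option String)) : Bool :=
  l.any (fun t => t.2.1.isSome && pvIsH t.2.2)
def pvHasV (l : List (Option String × Option String × Option String)) : Bool :=
  l.any (fun t => t.2.1.isSome && pvIsV t.2.2)

theorem pvMem_hallmark (c : Option String) : (c ∈ pvHallmarkSet) = (pvIsH c = true) := by
  have h : pvHallmarkSet = [some "0", some "3"] := by rfl
  rw [h]; cases c <;> (rw [eq_iff_iff]; simp [pvIsH])

theorem pvMem_viral (c : Option String) : (c ∈ pvViralLikeSet) = (pvIsV c = true) := by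
  have h : pvViralLikeSet = [some "1", some "4"] := by rfl
  rw [h]; cases c <;> (rw [eq_iff_iff]; simp [pvIsV])

theorem pvSufFlags_snd (l : List (Option String × Option String × Option String)) :
    (pvSufFlags l).2 = (pvHasH l, pvHasV l) := by
  induction l with
  | nil => rfl
  | cons x rest ih =>
    obtain ⟨dg, vg, vc⟩ := x
    simp [pvSufFlags, ih, pvHasH, pvHasV, Bool.or_comm]

theorem pvAFlag_hallmark (l : List (Option String × Option String × Option String)) :
    decide (0 < PySem.Set.len (PySem.Set.inter
      (PySem.Set.ofList (l.filterMap (fun q => if q.2.1.isSome then some q.2.2 else none)))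
      pvHallmarkSet)) = pvHasH l := by
  rw [Bool.eq_iff_iff]
  simp [PySem.Set.len, PySem.Set.inter, List.length_pos_iff, PySem.Set.mem_ofList,
        List.mem_filterMap, pvHasH, List.any_eq_true, pvMem_hallmark]
  tauto

theorem pvAFlag_viral (l : List (Option String × Option String × Option String)) :
    decide (0 < PySem.Set.len (PySem.Set.inter
      (PySem.Set.ofList (l.filterMap (fun q => if q.2.1.isSome then some q.2.2 else none)))
      pvViralLikeSet)) = pvHasV l := by
  rw [Bool.eq_iff_iff]
  simp [PySem.Set.len, PySem.Set.inter, List.length_pos_iff, PySem.Set.mem_ofList,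
        List.mem_filterMap, pvHasV, List.any_eq_true, pvMem_viral]
  tauto

theorem pvContains_hallmark (c : Option String) :
    PySem.Set.contains pvHallmarkSet c = pvIsH c := by
  simp only [pvHallmarkSet, pvIsH, PySem.Set.contains, PySem.Set.ofList]
  cases c <;> (rw [Bool.eq_iff_iff]; simp)

theorem pvContains_viral (c : Option String) :
    PySem.Set.contains pvViralLikeSet c = pvIsV c := by
  simp only [pvViralLikeSet, pvIsV, PySem.Set.contains, PySem.Set.ofList]
  cases c <;> (rw [Bool.eq_iff_iff]; simp)

theorem pvHasH_snoc (pre : List (Option String × Option String × Option String))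
    (t : Option String × Option String × Option String) :
    pvHasH (pre ++ [t]) = (pvHasH pre || (t.2.1.isSome && pvIsH t.2.2)) := by
  simp [pvHasH]

theorem pvHasV_snoc (pre : List (Option String × Option String × Option String))
    (t : Option String × Option String × Option String) :
    pvHasV (pre ++ [t]) = (pvHasV pre || (t.2.1.isSome && pvIsV t.2.2)) := by
  simp [pvHasV]

theorem pvEndCast (m k : Nat) :
    ((m : Int) == 0 || (m : Int) == (m : Int) + ((k : Int) + 1) - 1)
      = (m == 0 || m == m + (k + 1) - 1) := by
  rw [Bool.eq_iff_iff]; simp; omega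

theorem pvMain (rest pre : List (Option String × Option String × Option String))
    (d : PySem.Dict String Int) :
    (PySem.List.enumerate rest (pre.length : Int)).foldl (fun d p =>
      let i := p.1
      let dram_gene := p.2.1
      let virsorter_category := p.2.2.2
      match dram_gene with
      | none => d
      | some g =>
        let left_categories := (PySem.List.slice (pre ++ rest) none (some i)).filterMap
          (fun q => if q.2.1.isSome then some q.2.2 else none)
        let hallmark_left := decide (0 < PySem.Set.len (PySem.Set.inter (PySem.Set.ofList left_categories) pvHallmarkSet))
        let viral_like_left := decide (0 < PySem.Set.len (PySem.Set.inter (PySem.Set.ofList left_categories) pvViralLikeSet))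
        let right_categories := (PySem.List.slice (pre ++ rest) (some (i + 1)) none).filterMap
          (fun q => if q.2.1.isSome then some q.2.2 else none)
        let hallmark_right := decide (0 < PySem.Set.len (PySem.Set.inter (PySem.Set.ofList right_categories) pvHallmarkSet))
        let viral_like_right := decide (0 < PySem.Set.len (PySem.Set.inter (PySem.Set.ofList right_categories) pvViralLikeSet))
        let auxiliary_score : Int :=
          if i == 0 || i == (((pre ++ rest).length : Int) - 1) then 5
          else if hallmark_left && hallmark_right then 1
          else if (hallmark_left && viral_like_right) || (viral_like_left && hallmark_right) then 2
          else if viral_like_left && viral_like_right then 3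
          else if (hallmark_left || viral_like_left) || (hallmark_right || viral_like_right) then 4
          else if PySem.Set.contains pvHallmarkSet virsorter_category
               || PySem.Set.contains pvViralLikeSet virsorter_category then 4
          else 5
        d.insert g auxiliary_score) d
    = pvFwd d (pvHasH pre) (pvHasV pre) pre.length (pre ++ rest).length rest (pvSufFlags rest).1 := by
  induction rest generalizing pre d with
  | nil => rfl
  | cons x rest' ih =>
    obtain ⟨dg, vg, vc⟩ := x
    have hslice_l : PySem.List.slice (pre ++ (dg, vg, vc) :: rest') none (some (pre.length : Int)) = pre := by
      rw [PySem.List.slice_to_natCast]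
      exact List.take_left
    have hslice_r : PySem.List.slice (pre ++ (dg, vg, vc) :: rest') (some ((pre.length : Int) + 1)) none = rest' := by
      have h1 : ((pre.length : Int) + 1) = ((pre.length + 1 : Nat) : Int) := by push_cast; ring
      rw [h1, PySem.List.slice_from_natCast]
      have h2 : pre ++ (dg, vg, vc) :: rest' = (pre ++ [(dg, vg, vc)]) ++ rest' := by simp
      have h3 : pre.length + 1 = (pre ++ [(dg, vg, vc)]).length := by simp
      rw [h2, h3, List.drop_left]
    rw [PySem.List.enumerate_cons, List.foldl_cons]
    cases dg with
    | none =>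
      have hih := ih (pre ++ [((none : Option String), vg, vc)]) d
      simp only [pvFwd, pvSufFlags]
      simp only [List.append_assoc, List.singleton_append, List.length_append, List.length_cons,
        List.length_nil, Nat.cast_add, Nat.cast_one, zero_add, pvHasH_snoc, pvHasV_snoc] at hih ⊢
      exact hih
    | some g =>
      have hih := ih (pre ++ [(some g, vg, vc)]) (d.insert g
        (pvScore (pvHasH pre) (pvHasV pre) (pvHasH rest') (pvHasV rest')
          (pre.length == 0 || pre.length == pre.length + (rest'.length + 1) - 1) vc))
      simp only [pvFwd, pvSufFlags]
      simp only [List.append_assoc, List.singleton_append, List.length_append, List.length_cons,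
        List.length_nil, Nat.cast_add, Nat.cast_one, zero_add, pvHasH_snoc, pvHasV_snoc] at hih ⊢
      rw [hslice_l, hslice_r]
      simp only [pvAFlag_hallmark, pvAFlag_viral, pvContains_hallmark, pvContains_viral,
        pvEndCast, pvSufFlags_snd, pvScore, Bool.or_assoc] at hih ⊢
      exact hih

-- ===== VERDICT (by name: the statement is the Claim_ definition above) =====
theorem calculate_auxiliary_scores_spec : Claim_equal_calculate_auxiliary_scores := by
  intro gene_order _
  unfold Spec_calculate_auxiliary_scores calculate_auxiliary_scores calculate_auxiliary_scores_alt
  have h := pvMain gene_order [] PySem.Dict.empty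
  simpa using congrArg PySem.Dict.items h
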